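-- pv_equiv track=rewrite | github.com/Arreborn/tdp002 | legacy/lab3/card.py | find_joker
-- ===== SOURCE A (Python) =====
-- def find_joker(deck):
--     joker = []
--
--     for i in range(len(deck)):
--         if deck[i][0] == 5:
--             joker.append(i)
--
--     for i in range(len(deck)):
--         if deck[i][0] == 6:
--             joker.append(i)
--
--     return joker
-- ===== SOURCE B (Python) =====
-- def find_joker(deck):
--     fives = []
--     sixes = []
--     for i, card in enumerate(deck):
--         if card[0] == 5:
--             fives.append(i)
--         elif card[0] == 6:
--             sixes.append(i)
--     return fives + sixes
-- ===== Notes on version B (the rewrite author's own statement) =====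
-- stated objective: simpler
-- what changed: Replaces A's two index-based scans (range(len(deck)) twice) with a single enumerate pass that buckets indices into two accumulator lists (fives, sixes) and returns their concatenation.
import Mathlib
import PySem

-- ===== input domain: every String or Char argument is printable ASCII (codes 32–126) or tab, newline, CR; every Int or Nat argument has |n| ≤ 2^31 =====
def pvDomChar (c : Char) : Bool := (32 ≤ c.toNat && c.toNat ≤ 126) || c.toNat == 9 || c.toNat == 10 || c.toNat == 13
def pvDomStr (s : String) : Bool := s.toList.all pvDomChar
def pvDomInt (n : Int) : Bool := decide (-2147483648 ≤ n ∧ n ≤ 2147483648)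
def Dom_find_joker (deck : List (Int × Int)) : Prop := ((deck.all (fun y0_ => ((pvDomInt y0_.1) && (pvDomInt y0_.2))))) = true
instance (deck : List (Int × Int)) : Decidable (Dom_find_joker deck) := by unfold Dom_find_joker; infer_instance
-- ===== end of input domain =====

-- B replaces A's two separate index scans over the deck with one enumerate pass that buckets
-- indices into two accumulators (fives, sixes) and returns fives ++ sixes (objective: simpler).
-- ===== PORT A =====
def find_joker (deck : List (Int × Int)) : List Int :=
  let joker : List Int := []
  let joker := (PySem.List.pyRange 0 (PySem.List.len deck) 1).foldl
    (fun acc i => if (PySem.List.pyGetD deck i (0, 0)).1 == 5 then acc ++ [i] else acc) joker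
  let joker := (PySem.List.pyRange 0 (PySem.List.len deck) 1).foldl
    (fun acc i => if (PySem.List.pyGetD deck i (0, 0)).1 == 6 then acc ++ [i] else acc) joker
  joker

-- ===== PORT B =====
def find_joker_alt (deck : List (Int × Int)) : List Int :=
  let st := (PySem.List.enumerate deck 0).foldl
    (fun (st : List Int × List Int) p =>
      if p.2.1 == 5 then (st.1 ++ [p.1], st.2)
      else if p.2.1 == 6 then (st.1, st.2 ++ [p.1])
      else st) ([], [])
  st.1 ++ st.2

-- ===== PRECONDITION & SPEC =====
def Spec_find_joker (deck : List (Int × Int)) (out : List Int) : Prop := out = find_joker_alt deck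
instance (deck : List (Int × Int)) (out : List Int) : Decidable (Spec_find_joker deck out) := by unfold Spec_find_joker; infer_instance

-- ===== CLAIM (what is proved, stated in full; the proofs are below) =====
def Claim_equal_find_joker : Prop := ∀ (deck : List (Int × Int)), Dom_find_joker deck → Spec_find_joker deck (find_joker deck)

-- ===== LEMMAS AND PROOFS =====

-- ===== VERDICT (by name: the statement is the Claim_ definition above) =====

-- B's single-pass pair fold splits into the two filtered index lists.
theorem altPairFold (L : List (Int × (Int × Int))) (fs ss : List Int) :
    L.foldl
      (fun (st : List Int × List Int) p =>
        if p.2.1 == 5 then (st.1 ++ [p.1], st.2)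
        else if p.2.1 == 6 then (st.1, st.2 ++ [p.1])
        else st) (fs, ss)
    = (fs ++ (L.filter (fun p => p.2.1 == 5)).map (·.1),
       ss ++ (L.filter (fun p => p.2.1 == 6)).map (·.1)) := by
  induction L generalizing fs ss with
  | nil => simp
  | cons h t ih =>
    simp only [List.foldl_cons]
    split_ifs with h5 h6 <;> rw [ih] <;> simp_all

theorem find_joker_spec : Claim_equal_find_joker := by
  intro deck _
  unfold Spec_find_joker find_joker find_joker_alt
  rw [altPairFold]
  rw [PySem.List.enumerate_eq_map_pyRange deck ((0 : Int), (0 : Int))]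
  simp only [List.filter_map, List.map_map, PySem.List.foldl_append_if_eq_filter,
    List.nil_append, PySem.List.len_eq, Function.comp_def, List.map_id']
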